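-- pv_equiv track=rewrite | github.com/MrBrantCode/unitest_baseline | mut_generate/mist_train_cf/cf_4618/solution.py | get_keys_sorted_by_sum_length
-- ===== SOURCE A (Python) =====
-- from typing import List, Dict
--
-- def get_keys_sorted_by_sum_length(my_list: List[Dict]) -> List[str]:
--     # Create a dictionary to store the sum of lengths for each key
--     key_lengths = {}
--
--     # Iterate over each dictionary in the input list
--     for dictionary in my_list:
--         # Iterate over each key-value pair in the current dictionary
--         for key, value in dictionary.items():
--             # If the key is not already in the dictionary, initialize its length sum as 0
--             if key not in key_lengths:
--                 key_lengths[key] = 0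
--             # Add the length of the value to the sum for the current key
--             key_lengths[key] += len(str(value))
--
--     # Sort the keys based on their sum of lengths in descending order
--     sorted_keys = sorted(key_lengths.keys(), key=lambda x: key_lengths[x], reverse=True)
--
--     return sorted_keys
-- ===== SOURCE B (Python) =====
-- from typing import List, Dict
--
-- def get_keys_sorted_by_sum_length(my_list: List[Dict]) -> List[str]:
--     # Collect keys in first-encounter order (dict.fromkeys preserves it),
--     # then compute each key's total by a per-key scan over all dicts.
--     keys = list(dict.fromkeys(k for d in my_list for k in d))
--     return sorted(keys,
--                   key=lambda k: sum(len(str(d[k])) for d in my_list if k in d),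
--                   reverse=True)
-- ===== Notes on version B (the rewrite author's own statement) =====
-- stated objective: alternative
-- what changed: A accumulates per-key length sums in one dict during a single pass and then sorts its keys; B first collects the keys in first-encounter order via dict.fromkeys and sorts them with a key function that recomputes each key's total by a per-key scan over all dicts.
import Mathlib
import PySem

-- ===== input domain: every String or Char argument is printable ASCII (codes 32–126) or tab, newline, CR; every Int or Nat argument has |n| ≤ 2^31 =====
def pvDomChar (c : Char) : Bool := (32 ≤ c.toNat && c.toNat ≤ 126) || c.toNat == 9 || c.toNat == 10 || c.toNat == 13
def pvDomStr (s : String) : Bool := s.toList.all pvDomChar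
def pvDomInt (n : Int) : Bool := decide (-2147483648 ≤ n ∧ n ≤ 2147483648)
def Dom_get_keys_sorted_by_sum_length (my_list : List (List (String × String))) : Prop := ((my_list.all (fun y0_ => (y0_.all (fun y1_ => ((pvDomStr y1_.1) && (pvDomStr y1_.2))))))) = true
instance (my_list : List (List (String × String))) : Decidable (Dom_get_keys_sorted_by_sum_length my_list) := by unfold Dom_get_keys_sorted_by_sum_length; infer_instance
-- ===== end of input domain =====

-- B differs from A in decomposition: A accumulates per-key sums in one dict during a single
-- pass and sorts its keys; B collects the keys (ordered dedup) and sorts them with a key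
-- function that recomputes each key's total by a per-key scan over the dicts (objective: alternative).

-- ===== PORT A =====
-- loop body of A's inner 'for key, value in dictionary.items()':
-- 'if key not in key_lengths: key_lengths[key] = 0' then 'key_lengths[key] += len(str(value))'
def stepA (kl : PySem.Dict String Int) (p : String × String) : PySem.Dict String Int :=
  (if kl.contains p.1 then kl else kl.insert p.1 0).modify p.1 0 (· + (PySem.Str.len p.2 : Int))

def get_keys_sorted_by_sum_length (my_list : List (List (String × String))) : List String :=
  let key_lengths : PySem.Dict String Int :=
    my_list.foldl (fun kl dictionary => dictionary.foldl stepA kl) PySem.Dict.empty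
  PySem.List.sorted key_lengths.keys (fun x => key_lengths.getD x 0) true

-- ===== PORT B =====
-- 'sum(len(str(d[k])) for d in my_list if k in d)' (values are str, so len(str(v)) = len(v))
def pvSumLen (my_list : List (List (String × String))) (k : String) : Int :=
  ((my_list.filter (fun d => (PySem.Dict.mk d).contains k)).map
    (fun d => (PySem.Str.len (((PySem.Dict.mk d).get? k).getD "") : Int))).sum

def get_keys_sorted_by_sum_length_alt (my_list : List (List (String × String))) : List String :=
  let keys := PySem.List.dedup (my_list.flatMap (fun d => d.map Prod.fst))
  PySem.List.sorted keys (fun k => pvSumLen my_list k) true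

-- ===== PRECONDITION & SPEC =====
-- Pre_ is the dict representation invariant: each inner association list has pairwise
-- distinct keys (a Python dict cannot hold duplicate keys, so every Python input satisfies it).
def Pre_get_keys_sorted_by_sum_length (my_list : List (List (String × String))) : Prop :=
  ∀ d ∈ my_list, (d.map Prod.fst).Nodup
instance (my_list : List (List (String × String))) : Decidable (Pre_get_keys_sorted_by_sum_length my_list) := by unfold Pre_get_keys_sorted_by_sum_length; infer_instance

def pvWitness_get_keys_sorted_by_sum_length : (List (List (String × String))) :=
  [[("a","xx"),("b","y")],[("a","z")]]

def Spec_get_keys_sorted_by_sum_length (my_list : List (List (String × String))) (out : List String) : Prop := out = get_keys_sorted_by_sum_length_alt my_list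
instance (my_list : List (List (String × String))) (out : List String) : Decidable (Spec_get_keys_sorted_by_sum_length my_list out) := by unfold Spec_get_keys_sorted_by_sum_length; infer_instance

-- ===== CLAIM (what is proved, stated in full; the proofs are below) =====
def Claim_equal_get_keys_sorted_by_sum_length : Prop := ∀ (my_list : List (List (String × String))), Dom_get_keys_sorted_by_sum_length my_list → Pre_get_keys_sorted_by_sum_length my_list → Spec_get_keys_sorted_by_sum_length my_list (get_keys_sorted_by_sum_length my_list)

-- ===== LEMMAS AND PROOFS =====

theorem getD_stepA (kl : PySem.Dict String Int) (p : String × String) (k : String) :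
    (stepA kl p).getD k 0 = kl.getD k 0 + (if p.1 = k then (PySem.Str.len p.2 : Int) else 0) := by
  unfold stepA
  by_cases hc : kl.contains p.1 = true <;> by_cases hk : k = p.1
  · rw [if_pos hc, PySem.Dict.getD_modify, if_pos hk, hk]; simp
  · rw [if_pos hc, PySem.Dict.getD_modify, if_neg hk, if_neg (fun h => hk h.symm), add_zero]
  · rw [if_neg hc, PySem.Dict.getD_modify, if_pos hk, PySem.Dict.getD_insert, if_pos rfl, hk]
    have h0 : kl.getD p.1 0 = 0 := PySem.Dict.getD_of_not_contains kl 0 (by simpa using hc)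
    simp [h0]
  · rw [if_neg hc, PySem.Dict.getD_modify, if_neg hk, PySem.Dict.getD_insert, if_neg hk,
      if_neg (fun h => hk h.symm), add_zero]

theorem keys_stepA (kl : PySem.Dict String Int) (p : String × String) :
    (stepA kl p).keys = PySem.Set.add kl.keys p.1 := by
  unfold stepA
  by_cases hc : kl.contains p.1 = true
  · have hm : p.1 ∈ kl.keys := (PySem.Dict.contains_iff_mem_keys kl p.1).mp hc
    rw [if_pos hc, PySem.Dict.keys_modify,
      PySem.Dict.keys_insert_of_contains kl _ hc]
    simp [PySem.Set.add, PySem.Set.contains, hm]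
  · have hm : p.1 ∉ kl.keys := fun h => hc ((PySem.Dict.contains_iff_mem_keys kl p.1).mpr h)
    rw [if_neg hc, PySem.Dict.keys_modify,
      PySem.Dict.keys_insert_of_contains _ _ (PySem.Dict.contains_insert_self kl p.1 0),
      PySem.Dict.keys_insert_of_not_contains kl 0 (by simpa using hc)]
    simp [PySem.Set.add, PySem.Set.contains, hm]

theorem getD_innerA (d : List (String × String)) (kl : PySem.Dict String Int) (k : String) :
    (d.foldl stepA kl).getD k 0
      = kl.getD k 0 + ((d.filter (fun p => p.1 == k)).map (fun p => (PySem.Str.len p.2 : Int))).sum := by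
  induction d generalizing kl with
  | nil => simp
  | cons p rest ih =>
    rw [List.foldl_cons, ih, getD_stepA]
    by_cases h : p.1 = k
    · simp [h]; ring
    · simp [h]

theorem getD_outerA (my_list : List (List (String × String))) (kl : PySem.Dict String Int) (k : String) :
    (my_list.foldl (fun kl d => d.foldl stepA kl) kl).getD k 0
      = kl.getD k 0 + (my_list.map (fun d => ((d.filter (fun p => p.1 == k)).map (fun p => (PySem.Str.len p.2 : Int))).sum)).sum := by
  induction my_list generalizing kl with
  | nil => simp
  | cons d rest ih => rw [List.foldl_cons, ih, getD_innerA]; simp; ring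

theorem keys_innerA (d : List (String × String)) (kl : PySem.Dict String Int) :
    (d.foldl stepA kl).keys = (d.map Prod.fst).foldl PySem.Set.add kl.keys := by
  induction d generalizing kl with
  | nil => simp
  | cons p rest ih =>
    rw [List.foldl_cons, ih, keys_stepA, List.map_cons, List.foldl_cons]

theorem keys_outerA (my_list : List (List (String × String))) (kl : PySem.Dict String Int) :
    (my_list.foldl (fun kl d => d.foldl stepA kl) kl).keys
      = (my_list.flatMap (fun d => d.map Prod.fst)).foldl PySem.Set.add kl.keys := by
  induction my_list generalizing kl with
  | nil => simp
  | cons d rest ih =>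
    rw [List.foldl_cons, ih, List.flatMap_cons, List.foldl_append, keys_innerA]

theorem sum_map_filter_ite (l : List (List (String × String))) (q : List (String × String) → Bool)
    (f : List (String × String) → Int) :
    ((l.filter q).map f).sum = (l.map (fun x => if q x then f x else 0)).sum := by
  induction l with
  | nil => simp
  | cons x rest ih => by_cases h : q x <;> simp [h, ih]

theorem dict_contrib (d : List (String × String)) (h : (d.map Prod.fst).Nodup) (k : String) :
    (if (PySem.Dict.mk d).contains k then (PySem.Str.len (((PySem.Dict.mk d).get? k).getD "") : Int) else 0)
      = ((d.filter (fun p => p.1 == k)).map (fun p => (PySem.Str.len p.2 : Int))).sum := by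
  induction d with
  | nil => simp [PySem.Dict.contains]
  | cons p rest ih =>
    obtain ⟨a, v⟩ := p
    rw [List.map_cons, List.nodup_cons] at h
    by_cases hk : a = k
    · have hrest : rest.filter (fun q => q.1 == k) = [] := by
        rw [List.filter_eq_nil_iff]
        intro q hq hqk
        have hq1 : q.1 = a := by rw [hk]; simpa using hqk
        have : q.1 ∈ rest.map Prod.fst := List.mem_map_of_mem hq
        exact h.1 (hq1 ▸ this)
      simp [PySem.Dict.get?_mk_cons, PySem.Dict.contains, hk, hrest]
    · have hne : (a == k) = false := by simpa using hk
      have hrec := ih h.2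
      rw [PySem.Dict.contains] at hrec ⊢
      simp only [List.any_cons, hne, Bool.false_or, PySem.Dict.get?_mk_cons]
      rw [List.filter_cons_of_neg (by simp [hne])]
      simpa using hrec

theorem pvSumLen_eq (my_list : List (List (String × String)))
    (hpre : Pre_get_keys_sorted_by_sum_length my_list) (k : String) :
    pvSumLen my_list k
      = (my_list.map (fun d => ((d.filter (fun p => p.1 == k)).map (fun p => (PySem.Str.len p.2 : Int))).sum)).sum := by
  unfold pvSumLen
  rw [sum_map_filter_ite]
  congr 1
  exact List.map_congr_left (fun d hd => dict_contrib d (hpre d hd) k)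


-- ===== VERDICT (by name: the statement is the Claim_ definition above) =====
theorem get_keys_sorted_by_sum_length_spec : Claim_equal_get_keys_sorted_by_sum_length := by
  intro my_list _ hpre
  unfold Spec_get_keys_sorted_by_sum_length
  unfold get_keys_sorted_by_sum_length get_keys_sorted_by_sum_length_alt
  have hkeys : (my_list.foldl (fun kl d => d.foldl stepA kl) PySem.Dict.empty).keys
      = PySem.List.dedup (my_list.flatMap (fun d => d.map Prod.fst)) := by
    rw [keys_outerA, PySem.List.dedup_eq_ofList, PySem.Set.ofList_eq_foldl]
    simp [PySem.Dict.keys_empty]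
  have hfun : (fun x => (my_list.foldl (fun kl d => d.foldl stepA kl) PySem.Dict.empty).getD x 0)
      = (fun k => pvSumLen my_list k) := by
    funext k
    rw [getD_outerA, pvSumLen_eq my_list hpre k]
    simp [PySem.Dict.getD_empty]
  simp only [hkeys, hfun]
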